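-- pv_equiv track=rewrite | github.com/didier-building/porfolio | backend/portfolio_backend/api/skill_recommender.py | _suggest_learning_resources
-- ===== SOURCE A (Python) =====
-- from typing import Dict, List, Any, Optional
--
-- def _suggest_learning_resources(skills: List[str]) -> Dict[str, List[str]]:
--     """Suggest learning resources for skills"""
--     resources = {}
--
--     for skill in skills[:5]:  # Top 5 skills
--         skill_lower = skill.lower()
--         if 'python' in skill_lower:
--             resources[skill] = ['Python.org Documentation', 'Real Python', 'Python Crash Course Book']
--         elif 'react' in skill_lower:
--             resources[skill] = ['React Documentation', 'React Tutorial', 'Modern React with Redux']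
--         elif 'aws' in skill_lower:
--             resources[skill] = ['AWS Training', 'A Cloud Guru', 'AWS Certified Solutions Architect']
--         elif 'docker' in skill_lower:
--             resources[skill] = ['Docker Documentation', 'Docker Mastery Course', 'Kubernetes Basics']
--         else:
--             resources[skill] = [f'{skill} Documentation', f'{skill} Tutorial', f'Learn {skill} Online']
--
--     return resources
-- ===== SOURCE B (Python) =====
-- _PASSES = [  # reverse priority: later passes overwrite earlier ones
--     ('docker', ['Docker Documentation', 'Docker Mastery Course', 'Kubernetes Basics']),
--     ('aws', ['AWS Training', 'A Cloud Guru', 'AWS Certified Solutions Architect']),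
--     ('react', ['React Documentation', 'React Tutorial', 'Modern React with Redux']),
--     ('python', ['Python.org Documentation', 'Real Python', 'Python Crash Course Book']),
-- ]
--
-- def _suggest_learning_resources(skills):
--     top = skills[:5]
--     # stage 1: every skill gets the generic default
--     resources = {s: [f'{s} Documentation', f'{s} Tutorial', f'Learn {s} Online'] for s in top}
--     # stage 2: one overwrite pass per keyword, lowest priority first,
--     # so the last matching pass (highest priority) determines the value
--     for kw, res in _PASSES:
--         for s in top:
--             if kw in s.lower():
--                 resources[s] = list(res)
--     return resources
-- ===== Notes on version B (the rewrite author's own statement) =====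
-- stated objective: alternative
-- what changed: Instead of choosing each skill's resources with a per-skill first-match if/elif keyword chain, B first assigns every top-5 skill the generic default and then runs one overwrite pass per keyword over the skills in reverse priority order, so the last matching pass (highest-priority keyword) determines the final value.
import Mathlib
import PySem

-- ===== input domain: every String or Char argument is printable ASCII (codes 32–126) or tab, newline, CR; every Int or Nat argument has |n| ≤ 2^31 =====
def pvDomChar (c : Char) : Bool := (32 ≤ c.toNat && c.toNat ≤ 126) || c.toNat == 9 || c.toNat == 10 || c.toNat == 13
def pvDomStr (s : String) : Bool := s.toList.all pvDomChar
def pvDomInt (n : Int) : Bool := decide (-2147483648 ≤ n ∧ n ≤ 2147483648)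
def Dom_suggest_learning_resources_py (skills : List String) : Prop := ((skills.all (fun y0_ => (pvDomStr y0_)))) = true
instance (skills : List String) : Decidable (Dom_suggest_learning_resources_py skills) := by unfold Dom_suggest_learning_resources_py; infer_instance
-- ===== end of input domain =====

-- B changes the algorithm: instead of a per-skill first-match if/elif chain, B first assigns
-- every skill its generic default, then runs one overwrite pass per keyword in reverse priority
-- order, so the last matching pass (highest-priority keyword) determines the value (alternative).

-- ===== PORT A =====
def suggest_learning_resources_py (skills : List String) : List (String × List String) :=
  ((PySem.List.slice skills none (some 5)).foldl
    (fun (resources : PySem.Dict String (List String)) skill =>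
      let skill_lower := PySem.Str.lower skill
      if PySem.Str.isIn "python" skill_lower then
        resources.insert skill ["Python.org Documentation", "Real Python", "Python Crash Course Book"]
      else if PySem.Str.isIn "react" skill_lower then
        resources.insert skill ["React Documentation", "React Tutorial", "Modern React with Redux"]
      else if PySem.Str.isIn "aws" skill_lower then
        resources.insert skill ["AWS Training", "A Cloud Guru", "AWS Certified Solutions Architect"]
      else if PySem.Str.isIn "docker" skill_lower then
        resources.insert skill ["Docker Documentation", "Docker Mastery Course", "Kubernetes Basics"]
      else
        resources.insert skill [skill ++ " Documentation", skill ++ " Tutorial", "Learn " ++ skill ++ " Online"])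
    PySem.Dict.empty).items

-- ===== PORT B =====
-- reverse priority order: later passes overwrite earlier ones
def pvPasses : List (String × List String) :=
  [("docker", ["Docker Documentation", "Docker Mastery Course", "Kubernetes Basics"]),
   ("aws", ["AWS Training", "A Cloud Guru", "AWS Certified Solutions Architect"]),
   ("react", ["React Documentation", "React Tutorial", "Modern React with Redux"]),
   ("python", ["Python.org Documentation", "Real Python", "Python Crash Course Book"])]

def pvDefault (s : String) : List String :=
  [s ++ " Documentation", s ++ " Tutorial", "Learn " ++ s ++ " Online"]

def suggest_learning_resources_py_alt (skills : List String) : List (String × List String) :=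
  let top := PySem.List.slice skills none (some 5)
  let d0 : PySem.Dict String (List String) :=
    top.foldl (fun d s => d.insert s (pvDefault s)) PySem.Dict.empty
  (pvPasses.foldl
    (fun d p =>
      top.foldl (fun d s => if PySem.Str.isIn p.1 (PySem.Str.lower s) then d.insert s p.2 else d) d)
    d0).items

-- ===== PRECONDITION & SPEC =====
def Spec_suggest_learning_resources_py (skills : List String) (out : List (String × List String)) : Prop := out = suggest_learning_resources_py_alt skills
instance (skills : List String) (out : List (String × List String)) : Decidable (Spec_suggest_learning_resources_py skills out) := by unfold Spec_suggest_learning_resources_py; infer_instance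

-- ===== CLAIM (what is proved, stated in full; the proofs are below) =====
def Claim_equal_suggest_learning_resources_py : Prop := ∀ (skills : List String), Dom_suggest_learning_resources_py skills → Spec_suggest_learning_resources_py skills (suggest_learning_resources_py skills)

-- ===== LEMMAS AND PROOFS =====

-- the value A assigns to one skill (proof-side characterisation of A's loop body)
def pickA (s : String) : List String :=
  if PySem.Str.isIn "python" (PySem.Str.lower s) then
    ["Python.org Documentation", "Real Python", "Python Crash Course Book"]
  else if PySem.Str.isIn "react" (PySem.Str.lower s) then
    ["React Documentation", "React Tutorial", "Modern React with Redux"]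
  else if PySem.Str.isIn "aws" (PySem.Str.lower s) then
    ["AWS Training", "A Cloud Guru", "AWS Certified Solutions Architect"]
  else if PySem.Str.isIn "docker" (PySem.Str.lower s) then
    ["Docker Documentation", "Docker Mastery Course", "Kubernetes Basics"]
  else pvDefault s

lemma stepA_eq :
    (fun (resources : PySem.Dict String (List String)) skill =>
      let skill_lower := PySem.Str.lower skill
      if PySem.Str.isIn "python" skill_lower then
        resources.insert skill ["Python.org Documentation", "Real Python", "Python Crash Course Book"]
      else if PySem.Str.isIn "react" skill_lower then
        resources.insert skill ["React Documentation", "React Tutorial", "Modern React with Redux"]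
      else if PySem.Str.isIn "aws" skill_lower then
        resources.insert skill ["AWS Training", "A Cloud Guru", "AWS Certified Solutions Architect"]
      else if PySem.Str.isIn "docker" skill_lower then
        resources.insert skill ["Docker Documentation", "Docker Mastery Course", "Kubernetes Basics"]
      else
        resources.insert skill [skill ++ " Documentation", skill ++ " Tutorial", "Learn " ++ skill ++ " Online"])
    = fun d s => d.insert s (pickA s) := by
  funext d s
  simp only [pickA, pvDefault]
  split_ifs <;> rfl

-- one overwrite pass leaves the key list unchanged when every visited key is present
lemma keys_pass (c : String → Bool) (res : List String) (l : List String)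
    (d : PySem.Dict String (List String)) (h : ∀ s ∈ l, d.contains s = true) :
    (l.foldl (fun d s => if c s then d.insert s res else d) d).keys = d.keys := by
  induction l generalizing d with
  | nil => rfl
  | cons s rest ih =>
    simp only [List.foldl_cons]
    by_cases hc : c s
    · simp only [hc, if_pos]
      rw [ih _ (fun t ht => by
        rw [PySem.Dict.contains_insert]
        simp [h t (List.mem_cons_of_mem _ ht)])]
      exact PySem.Dict.keys_insert_of_contains _ _ (h s (List.mem_cons_self))
    · simp only [hc, if_neg, Bool.false_eq_true, not_false_iff]
      exact ih _ (fun t ht => h t (List.mem_cons_of_mem _ ht))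

-- the value at k after one overwrite pass
lemma getD_pass (c : String → Bool) (res : List String) (l : List String)
    (d : PySem.Dict String (List String)) (k : String) :
    (l.foldl (fun d s => if c s then d.insert s res else d) d).getD k [] =
      if c k = true ∧ k ∈ l then res else d.getD k [] := by
  induction l generalizing d with
  | nil => simp
  | cons s rest ih =>
    simp only [List.foldl_cons, ih]
    by_cases hk : c k = true ∧ k ∈ rest
    · simp [hk.1, hk.2]
    · rw [if_neg hk]
      by_cases hks : k = s
      · subst hks
        by_cases hc : c k = true
        · simp [hc, PySem.Dict.getD_insert_self]
        · simp [hc]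
      · have hno : ¬(c k = true ∧ k ∈ s :: rest) :=
          fun h => hk ⟨h.1, (List.mem_cons.mp h.2).resolve_left hks⟩
        rw [if_neg hno]
        by_cases hc : c s = true
        · rw [if_pos hc, PySem.Dict.getD_insert_of_ne _ _ _ hks]
        · rw [if_neg hc]

-- the value at k after the building loop (value depends only on the key)
lemma getD_build (f : String → List String) (l : List String)
    (d : PySem.Dict String (List String)) (k : String) :
    (l.foldl (fun d s => d.insert s (f s)) d).getD k [] =
      if k ∈ l then f k else d.getD k [] := by
  induction l generalizing d with
  | nil => simp
  | cons s rest ih =>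
    simp only [List.foldl_cons, ih]
    by_cases hk : k ∈ rest
    · simp [hk]
    · by_cases hks : k = s
      · subst hks; simp [hk, PySem.Dict.getD_insert_self]
      · rw [if_neg hk, PySem.Dict.getD_insert_of_ne _ _ _ hks,
          if_neg (fun h => hks ((List.mem_cons.mp h).resolve_right hk))]

-- ===== VERDICT (by name: the statement is the Claim_ definition above) =====
theorem suggest_learning_resources_py_spec : Claim_equal_suggest_learning_resources_py := by
  intro skills _
  unfold Spec_suggest_learning_resources_py
  unfold suggest_learning_resources_py suggest_learning_resources_py_alt
  rw [stepA_eq]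
  simp only [pvPasses, List.foldl_cons, List.foldl_nil]
  set l := PySem.List.slice skills none (some 5) with hl
  set d0 : PySem.Dict String (List String) :=
    l.foldl (fun d s => d.insert s (pvDefault s)) PySem.Dict.empty with hd0
  have hbuildkeys : ∀ (f : String → List String),
      (l.foldl (fun d s => d.insert s (f s)) PySem.Dict.empty).keys = PySem.Set.ofList l := by
    intro f
    rw [PySem.Dict.keys_foldl_insert]
    simp [PySem.Set.update_nil_left]
  have hcont : ∀ (d : PySem.Dict String (List String)), d.keys = PySem.Set.ofList l →
      ∀ s ∈ l, d.contains s = true := by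
    intro d hd s hs
    rw [PySem.Dict.contains_iff_mem_keys, hd]
    exact (PySem.Set.mem_ofList _ _).mpr hs
  have h0 : d0.keys = PySem.Set.ofList l := hbuildkeys _
  have h1 := (keys_pass (fun s => PySem.Str.isIn "docker" (PySem.Str.lower s)) ["Docker Documentation", "Docker Mastery Course", "Kubernetes Basics"] l d0 (hcont _ h0)).trans h0
  have h2 := (keys_pass (fun s => PySem.Str.isIn "aws" (PySem.Str.lower s)) ["AWS Training", "A Cloud Guru", "AWS Certified Solutions Architect"] l _ (hcont _ h1)).trans h1
  have h3 := (keys_pass (fun s => PySem.Str.isIn "react" (PySem.Str.lower s)) ["React Documentation", "React Tutorial", "Modern React with Redux"] l _ (hcont _ h2)).trans h2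
  have h4 := (keys_pass (fun s => PySem.Str.isIn "python" (PySem.Str.lower s)) ["Python.org Documentation", "Real Python", "Python Crash Course Book"] l _ (hcont _ h3)).trans h3
  have hA : (l.foldl (fun d s => d.insert s (pickA s)) PySem.Dict.empty).keys = PySem.Set.ofList l :=
    hbuildkeys _
  rw [PySem.Dict.items_eq_map_keys _ (by rw [hA]; exact PySem.Set.nodup_ofList l) [],
      PySem.Dict.items_eq_map_keys _ (by rw [h4]; exact PySem.Set.nodup_ofList l) []]
  rw [hA, h4]
  apply List.map_congr_left
  intro k hk
  have hkl : k ∈ l := (PySem.Set.mem_ofList _ _).mp hk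
  simp only [hd0, getD_build, getD_pass]
  simp only [pickA, hkl, and_true, if_pos]
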